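-- pv_equiv track=rewrite | github.com/miahaa/CS1400-Fall2022 | A8-SearchOptimization.py | find_smallest_positive_number
-- ===== SOURCE A (Python) =====
-- def find_smallest_positive_number(list):
--     """
--     Return an integer value that is the smallest number greater than 0 in the list or None if there are no positive numbers in the list.
--     :param list: A list of integer values.
--     :return: an integer value that is the smallest number greater than 0 in the list or None if there are no positive numbers in the list.
--     """
--     new_list = []
--     for number in list:
--         if number > 0:
--             new_list.append(number)
--     if new_list == []:
--         return None
--     smallest_number = new_list[0]
--     for number in new_list:
--         if number < smallest_number:
--             smallest_number = number
--     return smallest_number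
-- ===== SOURCE B (Python) =====
-- def find_smallest_positive_number(list):
--     smallest = None
--     for number in list:
--         if number > 0 and (smallest is None or number < smallest):
--             smallest = number
--     return smallest
-- ===== Notes on version B (the rewrite author's own statement) =====
-- stated objective: simpler
-- what changed: Replaces A's two-pass scheme (build a filtered list of positives, test it for emptiness, then scan it for the minimum) with one fused pass maintaining an Option running candidate and no intermediate list.
import Mathlib
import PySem

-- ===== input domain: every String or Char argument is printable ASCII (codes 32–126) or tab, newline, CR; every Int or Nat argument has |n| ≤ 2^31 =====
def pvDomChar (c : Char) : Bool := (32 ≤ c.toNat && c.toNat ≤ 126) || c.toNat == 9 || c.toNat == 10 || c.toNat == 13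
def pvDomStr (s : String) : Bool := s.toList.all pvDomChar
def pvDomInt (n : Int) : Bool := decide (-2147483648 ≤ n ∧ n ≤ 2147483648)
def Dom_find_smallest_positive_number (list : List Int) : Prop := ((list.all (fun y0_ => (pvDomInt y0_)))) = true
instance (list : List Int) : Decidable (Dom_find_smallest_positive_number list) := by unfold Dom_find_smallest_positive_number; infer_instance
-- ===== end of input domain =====

-- B fuses A's filter-then-scan into one pass with an Option running candidate (no intermediate list).
-- ===== PORT A =====
def find_smallest_positive_number (list : List Int) : Option Int :=
  let new_list := list.foldl (fun acc number => if number > 0 then acc ++ [number] else acc) []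
  if new_list = [] then none
  else
    let smallest_number := new_list.headI
    some (new_list.foldl (fun smallest_number number =>
      if number < smallest_number then number else smallest_number) smallest_number)

-- ===== PORT B =====
def find_smallest_positive_number_alt (list : List Int) : Option Int :=
  list.foldl (fun smallest number =>
    if number > 0 && smallest.elim true (fun s => number < s) then some number else smallest) none

-- ===== PRECONDITION & SPEC =====
def Spec_find_smallest_positive_number (list : List Int) (out : Option Int) : Prop := out = find_smallest_positive_number_alt list
instance (list : List Int) (out : Option Int) : Decidable (Spec_find_smallest_positive_number list out) := by unfold Spec_find_smallest_positive_number; infer_instance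

-- ===== CLAIM (what is proved, stated in full; the proofs are below) =====
def Claim_equal_find_smallest_positive_number : Prop := ∀ (list : List Int), Dom_find_smallest_positive_number list → Spec_find_smallest_positive_number list (find_smallest_positive_number list)

-- ===== LEMMAS AND PROOFS =====
theorem pv_foldB_some (l : List Int) (s : Int) :
    l.foldl (fun smallest number =>
      if number > 0 && smallest.elim true (fun s => number < s) then some number else smallest) (some s)
    = some ((l.filter (fun n => n > 0)).foldl (fun a n => if n < a then n else a) s) := by
  induction l generalizing s with
  | nil => simp
  | cons h t ih =>
    rw [List.foldl_cons, List.filter_cons]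
    have hstep : (if h > 0 && (some s : Option Int).elim true (fun x => h < x) then some h else some s)
        = some (if h > 0 then (if h < s then h else s) else s) := by
      by_cases hp : h > 0 <;> by_cases hlt : h < s <;> simp [hp, hlt]
    rw [hstep, ih]
    by_cases hp : h > 0 <;> by_cases hlt : h < s <;> simp [hp, hlt]

theorem pv_foldB_none (l : List Int) :
    l.foldl (fun smallest number =>
      if number > 0 && smallest.elim true (fun s => number < s) then some number else smallest) none
    = match l.filter (fun n => n > 0) with
      | [] => none
      | h :: t => some (t.foldl (fun a n => if n < a then n else a) h) := by
  induction l with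
  | nil => simp
  | cons h t ih =>
    rw [List.foldl_cons, List.filter_cons]
    have hstep : (if h > 0 && (none : Option Int).elim true (fun x => h < x) then some h else (none : Option Int))
        = if h > 0 then some h else none := by
      by_cases hp : h > 0 <;> simp [hp]
    rw [hstep]
    by_cases hp : h > 0
    · rw [if_pos hp, pv_foldB_some]
      simp [hp]
    · rw [if_neg hp, ih]
      simp [hp]

-- ===== VERDICT (by name: the statement is the Claim_ definition above) =====
theorem find_smallest_positive_number_spec : Claim_equal_find_smallest_positive_number := by
  intro l _
  show find_smallest_positive_number l = find_smallest_positive_number_alt l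
  unfold find_smallest_positive_number find_smallest_positive_number_alt
  rw [PySem.List.foldl_append_ite_eq_filter, pv_foldB_none]
  simp only [List.nil_append]
  cases hf : l.filter (fun n => n > 0) with
  | nil => simp
  | cons h t =>
    simp [List.foldl_cons, List.headI]
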